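-- pv_equiv track=rewrite | github.com/scout719/adventOfCode | 2024/adventOfCode_20.py | day20_t_to
-- ===== SOURCE A (Python) =====
-- from collections import deque
--
-- def day20_t_to(walls, D, er, ec):
--     to_target = {}
--     q = deque([(0, er, ec)])
--     while q:
--         t, r, c = q.popleft()
--         if (r, c) in to_target:
--             continue
--         to_target[(r, c)] = t
--
--         for dr, dc in D:
--             rr, cc = r + dr, c + dc
--             if (rr, cc) not in walls:
--                 q.append((t + 1, rr, cc))
--     return to_target
-- ===== SOURCE B (Python) =====
-- def day20_t_to(walls, D, er, ec):
--     # Mark-on-enqueue BFS: cells are recorded in to_target the moment they are generated,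
--     # so the frontier never holds duplicates and no skip-at-pop test is needed.
--     to_target = {(er, ec): 0}
--     frontier = [(er, ec)]
--     t = 0
--     while frontier:
--         t += 1
--         nxt = []
--         for r, c in frontier:
--             for dr, dc in D:
--                 q = (r + dr, c + dc)
--                 if q not in walls and q not in to_target:
--                     to_target[q] = t
--                     nxt.append(q)
--         frontier = nxt
--     return to_target
-- ===== Notes on version B (the rewrite author's own statement) =====
-- stated objective: alternative
-- what changed: Replaced A's lazy-deletion BFS (a deque of (time,r,c) entries that enqueues duplicates and discards already-visited cells at pop time) by a mark-on-enqueue BFS: a cell is recorded in to_target the moment it is generated, the frontier never contains duplicates or timestamps, and the distance is an outer level counter; the skip-at-pop test disappears.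
import Mathlib
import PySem

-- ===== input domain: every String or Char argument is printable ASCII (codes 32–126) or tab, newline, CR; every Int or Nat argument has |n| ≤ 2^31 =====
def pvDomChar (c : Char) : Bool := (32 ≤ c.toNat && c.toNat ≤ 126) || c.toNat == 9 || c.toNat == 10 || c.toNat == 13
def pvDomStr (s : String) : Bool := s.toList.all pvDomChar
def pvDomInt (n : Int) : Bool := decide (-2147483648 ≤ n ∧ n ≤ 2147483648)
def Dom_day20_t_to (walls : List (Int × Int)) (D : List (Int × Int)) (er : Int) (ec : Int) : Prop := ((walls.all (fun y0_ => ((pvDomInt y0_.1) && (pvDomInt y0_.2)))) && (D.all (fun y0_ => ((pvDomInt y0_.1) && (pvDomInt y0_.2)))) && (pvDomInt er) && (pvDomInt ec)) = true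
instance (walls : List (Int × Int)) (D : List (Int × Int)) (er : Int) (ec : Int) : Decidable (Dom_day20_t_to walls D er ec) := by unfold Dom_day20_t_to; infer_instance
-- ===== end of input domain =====

-- B replaces A's lazy-deletion deque BFS (timestamped entries, duplicates enqueued and skipped at
-- pop) by a mark-on-enqueue BFS (cells recorded when generated, duplicate-free frontier, distance
-- kept as a level counter); same return value, objective: alternative.
-- In both ports the Nat argument is FUEL, a pure totality device for inputs on which the Python
-- loops forever (an unenclosed grid); the two ports' fuels are aligned so that they truncate to the
-- same dictionary, which is what makes the equivalence hold on every input of the domain.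

-- ===== PORT A =====
-- A's while-loop over the deque; fuel is spent only when a fresh cell is popped and expanded
def goA (walls D : List (Int × Int)) :
    Nat → List (Int × Int × Int) → PySem.Dict (Int × Int) Int → PySem.Dict (Int × Int) Int
  | _, [], vis => vis
  | f, (t, r, c) :: q, vis =>
    if (vis.get? (r, c)).isSome then goA walls D f q vis
    else match f with
      | 0 => vis
      | f' + 1 =>
        goA walls D f'
          (D.foldl (fun acc d =>
            if walls.contains (r + d.1, c + d.2) then acc
            else acc ++ [(t + 1, r + d.1, c + d.2)]) q)
          (vis.insert (r, c) t)
  termination_by f q _ => (f, q.length)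
  decreasing_by
  · exact Prod.Lex.right _ (by simp)
  · exact Prod.Lex.left _ _ (by omega)

def day20_t_to (walls : List (Int × Int)) (D : List (Int × Int)) (er : Int) (ec : Int) : List (Int × Int × Int) :=
  (goA walls D (2 ^ 60 + 1) [(0, er, ec)] PySem.Dict.empty).items.map
    (fun kv => (kv.1.1, kv.1.2, kv.2))

-- ===== PORT B =====
-- B's inner for-loop over D: each unblocked, unseen neighbour is recorded and appended (one fuel each)
def dLoopB (walls : List (Int × Int)) (r c t : Int) :
    List (Int × Int) → PySem.Dict (Int × Int) Int → List (Int × Int) → Nat →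
      PySem.Dict (Int × Int) Int × List (Int × Int) × Nat
  | [], vis, nxt, f => (vis, nxt, f)
  | d :: ds, vis, nxt, f =>
    if !walls.contains (r + d.1, c + d.2) && (vis.get? (r + d.1, c + d.2)).isNone then
      match f with
      | 0 => dLoopB walls r c t ds vis nxt 0
      | f' + 1 =>
        dLoopB walls r c t ds (vis.insert (r + d.1, c + d.2) t)
          (nxt ++ [(r + d.1, c + d.2)]) f'
    else dLoopB walls r c t ds vis nxt f

-- B's for-loop over the frontier
def cellLoopB (walls D : List (Int × Int)) (t : Int) :
    List (Int × Int) → PySem.Dict (Int × Int) Int → List (Int × Int) → Nat →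
      PySem.Dict (Int × Int) Int × List (Int × Int) × Nat
  | [], vis, nxt, f => (vis, nxt, f)
  | p :: cur, vis, nxt, f =>
    let s := dLoopB walls p.1 p.2 t D vis nxt f
    cellLoopB walls D t cur s.1 s.2.1 s.2.2

-- B's outer while-loop; the first Nat is an outer totality bound, never reached before the
-- per-insertion fuel runs out
def outerB (walls D : List (Int × Int)) :
    Nat → List (Int × Int) → Int → PySem.Dict (Int × Int) Int → Nat →
      PySem.Dict (Int × Int) Int
  | 0, _, _, vis, _ => vis
  | k + 1, frontier, t, vis, f =>
    if frontier.isEmpty then vis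
    else
      let s := cellLoopB walls D (t + 1) frontier vis [] f
      outerB walls D k s.2.1 (t + 1) s.1 s.2.2

def day20_t_to_alt (walls : List (Int × Int)) (D : List (Int × Int)) (er : Int) (ec : Int) : List (Int × Int × Int) :=
  (outerB walls D (2 ^ 60 + 2) [(er, ec)] 0
      ((PySem.Dict.empty : PySem.Dict (Int × Int) Int).insert (er, ec) 0) (2 ^ 60)).items.map
    (fun kv => (kv.1.1, kv.1.2, kv.2))

-- ===== PRECONDITION & SPEC =====
def Spec_day20_t_to (walls : List (Int × Int)) (D : List (Int × Int)) (er : Int) (ec : Int) (out : List (Int × Int × Int)) : Prop := out = day20_t_to_alt walls D er ec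
instance (walls : List (Int × Int)) (D : List (Int × Int)) (er : Int) (ec : Int) (out : List (Int × Int × Int)) : Decidable (Spec_day20_t_to walls D er ec out) := by unfold Spec_day20_t_to; infer_instance

-- ===== CLAIM =====
def Claim_equal_day20_t_to : Prop := ∀ (walls : List (Int × Int)) (D : List (Int × Int)) (er : Int) (ec : Int), Dom_day20_t_to walls D er ec → Spec_day20_t_to walls D er ec (day20_t_to walls D er ec)

-- ===== LEMMAS AND PROOFS =====

-- list of cells optionally tagged with their BFS level (proof-side helper)
def tagL (t : Int) (xs : List (Int × Int)) : List (Int × Int × Int) :=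
  xs.map (fun p => (t, p.1, p.2))

-- insert a tagged list of cells into the dictionary, in order
def insTags (vis : PySem.Dict (Int × Int) Int) (l : List (Int × Int × Int)) :
    PySem.Dict (Int × Int) Int :=
  l.foldl (fun d e => d.insert (e.2.1, e.2.2) e.1) vis

-- the first-occurrence fresh entries of a queue, relative to a visited dict
def extract (vis : PySem.Dict (Int × Int) Int) :
    List (Int × Int × Int) → List (Int × Int × Int)
  | [] => []
  | (t, r, c) :: Q =>
    if (vis.get? (r, c)).isSome then extract vis Q
    else (t, r, c) :: extract (vis.insert (r, c) t) Q

-- the fresh neighbours (first occurrence, unblocked, unseen) that one cell contributes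
def freshL (walls : List (Int × Int)) (r c t : Int) :
    List (Int × Int) → PySem.Dict (Int × Int) Int → List (Int × Int)
  | [], _ => []
  | d :: ds, vis =>
    if !walls.contains (r + d.1, c + d.2) && (vis.get? (r + d.1, c + d.2)).isNone then
      (r + d.1, c + d.2) :: freshL walls r c t ds (vis.insert (r + d.1, c + d.2) t)
    else freshL walls r c t ds vis

-- the tagged entries A's inner loop appends for one popped cell
def pushTag (walls D : List (Int × Int)) (r c t : Int) : List (Int × Int × Int) :=
  (D.filter (fun d => !walls.contains (r + d.1, c + d.2))).map
    (fun d => (t + 1, r + d.1, c + d.2))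

-- B's continuation from the middle of a level: finish the cell loop, then the outer loop
def outerCont (walls D : List (Int × Int)) (k : Nat) (t1 : Int) (cur : List (Int × Int))
    (visB : PySem.Dict (Int × Int) Int) (nxt : List (Int × Int)) (f : Nat) :
    PySem.Dict (Int × Int) Int :=
  let s := cellLoopB walls D t1 cur visB nxt f
  outerB walls D k s.2.1 t1 s.1 s.2.2

theorem foldl_push_eq (walls D : List (Int × Int)) (r c t : Int) (q : List (Int × Int × Int)) :
    D.foldl (fun acc d =>
        if walls.contains (r + d.1, c + d.2) then acc
        else acc ++ [(t + 1, r + d.1, c + d.2)]) q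
      = q ++ pushTag walls D r c t := by
  have h1 : D.foldl (fun acc d =>
        if walls.contains (r + d.1, c + d.2) then acc
        else acc ++ [(t + 1, r + d.1, c + d.2)]) q
      = D.foldl (fun acc d =>
          if (!walls.contains (r + d.1, c + d.2)) then acc ++ [(t + 1, r + d.1, c + d.2)]
          else acc) q :=
    PySem.List.foldl_congr_mem _ _ _ _ (by
      intro acc d _
      cases h : walls.contains (r + d.1, c + d.2) <;> simp_all)
  rw [h1]
  exact PySem.List.foldl_append_if _ _ _ _

theorem goA_cons (walls D : List (Int × Int)) (f : Nat) (t r c : Int)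
    (q : List (Int × Int × Int)) (vis : PySem.Dict (Int × Int) Int) :
    goA walls D f ((t, r, c) :: q) vis
      = if (vis.get? (r, c)).isSome then goA walls D f q vis
        else match f with
          | 0 => vis
          | f' + 1 =>
            goA walls D f'
              (D.foldl (fun acc d =>
                if walls.contains (r + d.1, c + d.2) then acc
                else acc ++ [(t + 1, r + d.1, c + d.2)]) q)
              (vis.insert (r, c) t) := by
  rw [goA.eq_def]

theorem dLoopB_cons (walls : List (Int × Int)) (r c t : Int) (d : Int × Int)
    (ds : List (Int × Int)) (vis : PySem.Dict (Int × Int) Int)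
    (nxt : List (Int × Int)) (f : Nat) :
    dLoopB walls r c t (d :: ds) vis nxt f
      = if !walls.contains (r + d.1, c + d.2) && (vis.get? (r + d.1, c + d.2)).isNone then
          match f with
          | 0 => dLoopB walls r c t ds vis nxt 0
          | f' + 1 =>
            dLoopB walls r c t ds (vis.insert (r + d.1, c + d.2) t)
              (nxt ++ [(r + d.1, c + d.2)]) f'
        else dLoopB walls r c t ds vis nxt f := by
  rw [dLoopB.eq_def]

theorem goA_nil (walls D : List (Int × Int)) (f : Nat) (vis : PySem.Dict (Int × Int) Int) :
    goA walls D f [] vis = vis := by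
  rw [goA.eq_def]

theorem goA_zero (walls D : List (Int × Int)) :
    ∀ (Q : List (Int × Int × Int)) (vis : PySem.Dict (Int × Int) Int),
      goA walls D 0 Q vis = vis := by
  intro Q
  induction Q with
  | nil => intro vis; exact goA_nil walls D 0 vis
  | cons e Q' ih =>
    intro vis
    obtain ⟨t, r, c⟩ := e
    rw [goA_cons]
    by_cases h : (vis.get? (r, c)).isSome
    · rw [if_pos h]; exact ih vis
    · rw [if_neg h]
theorem insTags_append (vis : PySem.Dict (Int × Int) Int) (l1 l2 : List (Int × Int × Int)) :
    insTags vis (l1 ++ l2) = insTags (insTags vis l1) l2 :=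
  List.foldl_append

theorem tagL_append (t : Int) (xs ys : List (Int × Int)) :
    tagL t (xs ++ ys) = tagL t xs ++ tagL t ys :=
  List.map_append ..

theorem extract_append (Q1 : List (Int × Int × Int)) :
    ∀ (vis : PySem.Dict (Int × Int) Int) (Q2 : List (Int × Int × Int)),
      extract vis (Q1 ++ Q2)
        = extract vis Q1 ++ extract (insTags vis (extract vis Q1)) Q2 := by
  induction Q1 with
  | nil => intro vis Q2; simp [extract, insTags]
  | cons e Q1' ih =>
    obtain ⟨t0, r0, c0⟩ := e
    intro vis Q2
    rw [List.cons_append, extract, extract]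
    by_cases h : (vis.get? (r0, c0)).isSome
    · rw [if_pos h, if_pos h, ih]
    · rw [if_neg h, if_neg h, List.cons_append]
      rw [ih]
      rfl

theorem extract_pushTag (walls : List (Int × Int)) (r c t : Int) :
    ∀ (D : List (Int × Int)) (vis : PySem.Dict (Int × Int) Int),
      extract vis (pushTag walls D r c t) = tagL (t + 1) (freshL walls r c (t + 1) D vis) := by
  intro D
  induction D with
  | nil => intro vis; simp [pushTag, extract, freshL, tagL]
  | cons d D' ih =>
    intro vis
    by_cases hw : (r + d.1, c + d.2) ∈ walls
    · have hpt : pushTag walls (d :: D') r c t = pushTag walls D' r c t := by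
        simp [pushTag, hw]
      have hf : freshL walls r c (t + 1) (d :: D') vis = freshL walls r c (t + 1) D' vis := by
        rw [freshL]
        simp [List.contains_eq_mem, hw]
      rw [hpt, hf]
      exact ih vis
    · have hpt : pushTag walls (d :: D') r c t
          = (t + 1, r + d.1, c + d.2) :: pushTag walls D' r c t := by
        simp [pushTag, hw]
      rw [hpt, extract]
      cases hq : vis.get? (r + d.1, c + d.2) with
      | some v =>
        have hf : freshL walls r c (t + 1) (d :: D') vis = freshL walls r c (t + 1) D' vis := by
          rw [freshL]
          simp [hq]
        rw [if_pos (by simp), hf]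
        exact ih vis
      | none =>
        have hf : freshL walls r c (t + 1) (d :: D') vis
            = (r + d.1, c + d.2) ::
                freshL walls r c (t + 1) D' (vis.insert (r + d.1, c + d.2) (t + 1)) := by
          rw [freshL]
          simp [List.contains_eq_mem, hw, hq]
        rw [if_neg (by simp), hf]
        show _ = (t + 1, r + d.1, c + d.2)
            :: tagL (t + 1) (freshL walls r c (t + 1) D' (vis.insert (r + d.1, c + d.2) (t + 1)))
        rw [← ih]
theorem dLoop_char (walls : List (Int × Int)) (r c : Int) (t : Int) :
    ∀ (ds : List (Int × Int)) (vis : PySem.Dict (Int × Int) Int)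
      (nxt : List (Int × Int)) (f : Nat),
      dLoopB walls r c t ds vis nxt f
        = (insTags vis (tagL t ((freshL walls r c t ds vis).take f)),
           nxt ++ (freshL walls r c t ds vis).take f,
           f - ((freshL walls r c t ds vis).take f).length) := by
  intro ds
  induction ds with
  | nil => intro vis nxt f; simp [dLoopB, freshL, insTags, tagL]
  | cons d ds' ih =>
    intro vis nxt f
    rw [dLoopB_cons, freshL]
    by_cases hc : (!walls.contains (r + d.1, c + d.2) &&
        (vis.get? (r + d.1, c + d.2)).isNone) = true
    · rw [if_pos hc, if_pos hc]
      cases f with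
      | zero => rw [ih]; simp
      | succ f' =>
        show dLoopB walls r c t ds' (vis.insert (r + d.1, c + d.2) t)
            (nxt ++ [(r + d.1, c + d.2)]) f' = _
        rw [List.take_succ_cons, ih]
        simp only [List.length_cons]
        have harith : f' + 1 - (((freshL walls r c t ds'
            (vis.insert (r + d.1, c + d.2) t)).take f').length + 1)
            = f' - ((freshL walls r c t ds' (vis.insert (r + d.1, c + d.2) t)).take f').length := by
          omega
        rw [harith, List.append_assoc]
        rfl
    · rw [if_neg hc, if_neg hc, ih]

theorem cellLoop_zero (walls D : List (Int × Int)) (t : Int) :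
    ∀ (cur : List (Int × Int)) (vis : PySem.Dict (Int × Int) Int) (nxt : List (Int × Int)),
      cellLoopB walls D t cur vis nxt 0 = (vis, nxt, 0) := by
  intro cur
  induction cur with
  | nil => intro vis nxt; rfl
  | cons p cur' ih =>
    intro vis nxt
    rw [cellLoopB]
    have h := dLoop_char walls p.1 p.2 t D vis nxt 0
    simp only [List.take_zero] at h
    simp only [h]
    simpa [insTags] using ih vis nxt

theorem outer_zero (walls D : List (Int × Int)) :
    ∀ (k : Nat) (frontier : List (Int × Int)) (t : Int) (vis : PySem.Dict (Int × Int) Int),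
      outerB walls D k frontier t vis 0 = vis := by
  intro k
  induction k with
  | zero => intro frontier t vis; rfl
  | succ k' ih =>
    intro frontier t vis
    rw [outerB]
    by_cases h : frontier.isEmpty
    · rw [if_pos h]
    · rw [if_neg h]
      simp only [cellLoop_zero]
      exact ih [] (t + 1) vis

theorem outer_nilFrontier (walls D : List (Int × Int)) (k : Nat) (t : Int)
    (vis : PySem.Dict (Int × Int) Int) (f : Nat) :
    outerB walls D k [] t vis f = vis := by
  cases k with
  | zero => rfl
  | succ k' => rw [outerB]; simp

theorem goA_pending (walls D : List (Int × Int)) :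
    ∀ (P : List (Int × Int × Int)) (Q : List (Int × Int × Int))
      (vis : PySem.Dict (Int × Int) Int),
      (∃ rest, extract vis Q = P ++ rest) →
      goA walls D P.length Q vis = insTags vis P := by
  intro P
  induction P with
  | nil =>
    intro Q vis _
    simpa [insTags] using goA_zero walls D Q vis
  | cons e' P' ihP =>
    intro Q
    induction Q with
    | nil =>
      intro vis h
      obtain ⟨rest, hex⟩ := h
      simp [extract] at hex
    | cons e Q' ihQ =>
      intro vis h
      obtain ⟨rest, hex⟩ := h
      obtain ⟨t, r, c⟩ := e
      rw [extract] at hex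
      rw [goA_cons]
      by_cases hv : (vis.get? (r, c)).isSome
      · rw [if_pos hv]
        rw [if_pos hv] at hex
        exact ihQ vis ⟨rest, hex⟩
      · rw [if_neg hv]
        rw [if_neg hv] at hex
        simp only [List.cons_append, List.cons.injEq] at hex
        obtain ⟨he, hex'⟩ := hex
        simp only [List.length_cons]
        rw [foldl_push_eq]
        have hex2 : extract (vis.insert (r, c) t) (Q' ++ pushTag walls D r c t)
            = P' ++ (rest ++ extract (insTags (vis.insert (r, c) t)
                (extract (vis.insert (r, c) t) Q')) (pushTag walls D r c t)) := by
          rw [extract_append, hex', List.append_assoc]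
        have hmain := ihP (Q' ++ pushTag walls D r c t) (vis.insert (r, c) t) ⟨_, hex2⟩
        rw [hmain, ← he]
        rfl
-- one fresh pop of A = one frontier cell of B, in the middle of a level
theorem freshStep (walls D : List (Int × Int)) (n : Nat)
    (IH : ∀ m, m < n → ∀ (Q : List (Int × Int × Int)) (vis : PySem.Dict (Int × Int) Int)
      (cur nxt : List (Int × Int)) (t : Int) (k f : Nat),
      m = f + cur.length + nxt.length → f + nxt.length + 1 ≤ k →
      extract vis Q = tagL t cur ++ tagL (t + 1) nxt →
      goA walls D m Q vis
        = outerCont walls D k (t + 1) cur (insTags vis (tagL t cur ++ tagL (t + 1) nxt)) nxt f)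
    (Q' : List (Int × Int × Int)) (vis : PySem.Dict (Int × Int) Int)
    (p0 : Int × Int) (cur' nxt : List (Int × Int)) (t : Int) (k f : Nat)
    (hn : n = f + (cur'.length + 1) + nxt.length)
    (hk : f + nxt.length + 1 ≤ k)
    (hv : (vis.get? (p0.1, p0.2)).isSome = false)
    (hex : extract (vis.insert (p0.1, p0.2) t) Q' = tagL t cur' ++ tagL (t + 1) nxt) :
    goA walls D n ((t, p0.1, p0.2) :: Q') vis
      = outerCont walls D k (t + 1) (p0 :: cur')
          (insTags vis (tagL t (p0 :: cur') ++ tagL (t + 1) nxt)) nxt f := by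
  have hn' : n = (f + cur'.length + nxt.length) + 1 := by omega
  rw [hn', goA_cons, if_neg (by simp [hv])]
  show goA walls D (f + cur'.length + nxt.length)
      (D.foldl (fun acc d =>
        if walls.contains (p0.1 + d.1, p0.2 + d.2) then acc
        else acc ++ [(t + 1, p0.1 + d.1, p0.2 + d.2)]) Q')
      (vis.insert (p0.1, p0.2) t) = _
  rw [foldl_push_eq]
  have hvisB : insTags vis (tagL t (p0 :: cur') ++ tagL (t + 1) nxt)
      = insTags (vis.insert (p0.1, p0.2) t) (tagL t cur' ++ tagL (t + 1) nxt) := rfl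
  have hex2 : extract (vis.insert (p0.1, p0.2) t) (Q' ++ pushTag walls D p0.1 p0.2 t)
      = (tagL t cur' ++ tagL (t + 1) nxt)
        ++ tagL (t + 1) (freshL walls p0.1 p0.2 (t + 1) D
            (insTags vis (tagL t (p0 :: cur') ++ tagL (t + 1) nxt))) := by
    rw [extract_append, hex, extract_pushTag, ← hvisB]
  set FR := freshL walls p0.1 p0.2 (t + 1) D
      (insTags vis (tagL t (p0 :: cur') ++ tagL (t + 1) nxt)) with hFR
  -- unfold B's side: one cell of the cell loop
  have hrhs : outerCont walls D k (t + 1) (p0 :: cur')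
        (insTags vis (tagL t (p0 :: cur') ++ tagL (t + 1) nxt)) nxt f
      = outerCont walls D k (t + 1) cur'
          (insTags (insTags vis (tagL t (p0 :: cur') ++ tagL (t + 1) nxt))
            (tagL (t + 1) (FR.take f)))
          (nxt ++ FR.take f) (f - (FR.take f).length) := by
    unfold outerCont
    rw [cellLoopB]
    rw [dLoop_char]
  rw [hrhs]
  by_cases hF : FR.length ≤ f
  · have htake : FR.take f = FR := List.take_of_length_le hF
    rw [htake]
    have hIH := IH (f + cur'.length + nxt.length) (by omega)
      (Q' ++ pushTag walls D p0.1 p0.2 t) (vis.insert (p0.1, p0.2) t)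
      cur' (nxt ++ FR) t k (f - FR.length)
      (by simp only [List.length_append]; omega)
      (by simp only [List.length_append]; omega)
      (by rw [hex2, tagL_append, List.append_assoc])
    rw [hIH]
    have hdict : insTags (vis.insert (p0.1, p0.2) t)
          (tagL t cur' ++ tagL (t + 1) (nxt ++ FR))
        = insTags (insTags vis (tagL t (p0 :: cur') ++ tagL (t + 1) nxt))
            (tagL (t + 1) FR) := by
      rw [tagL_append, ← List.append_assoc, insTags_append, ← hvisB]
    rw [hdict]
  · have hlen : (FR.take f).length = f := by
      rw [List.length_take]; omega
    have hzero : f - (FR.take f).length = 0 := by omega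
    rw [hzero]
    -- B's side: out of fuel, nothing more is ever inserted
    unfold outerCont
    rw [cellLoop_zero, outer_zero]
    -- A's side: exactly enough fuel for the pending fresh entries
    have hpend := goA_pending walls D
      (tagL t cur' ++ (tagL (t + 1) nxt ++ tagL (t + 1) (FR.take f)))
      (Q' ++ pushTag walls D p0.1 p0.2 t) (vis.insert (p0.1, p0.2) t)
      ⟨tagL (t + 1) (FR.drop f), by
        rw [hex2]
        have : tagL (t + 1) FR
            = tagL (t + 1) (FR.take f) ++ tagL (t + 1) (FR.drop f) := by
          rw [← tagL_append, List.take_append_drop]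
        rw [this]
        simp [List.append_assoc]⟩
    have hplen : (tagL t cur' ++ (tagL (t + 1) nxt ++ tagL (t + 1) (FR.take f))).length
        = f + cur'.length + nxt.length := by
      simp [tagL]
      omega
    rw [hplen] at hpend
    rw [hpend]
    rw [← List.append_assoc, insTags_append, ← hvisB]
-- the full bisimulation: A's queue run equals B's level run, fuel aligned
theorem bisimM (walls D : List (Int × Int)) :
    ∀ (n : Nat) (Q : List (Int × Int × Int)) (vis : PySem.Dict (Int × Int) Int)
      (cur nxt : List (Int × Int)) (t : Int) (k f : Nat),
      n = f + cur.length + nxt.length → f + nxt.length + 1 ≤ k →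
      extract vis Q = tagL t cur ++ tagL (t + 1) nxt →
      goA walls D n Q vis
        = outerCont walls D k (t + 1) cur (insTags vis (tagL t cur ++ tagL (t + 1) nxt)) nxt f := by
  intro n
  induction n using Nat.strong_induction_on with
  | _ n IH =>
    intro Q
    induction Q with
    | nil =>
      intro vis cur nxt t k f hn hk hex
      have hex' : tagL t cur ++ tagL (t + 1) nxt = [] := by
        rw [← hex]; rfl
      obtain ⟨h1, h2⟩ := List.append_eq_nil_iff.mp hex'
      obtain rfl : cur = [] := by simpa [tagL] using h1
      obtain rfl : nxt = [] := by simpa [tagL] using h2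
      rw [goA_nil]
      exact (outer_nilFrontier walls D k (t + 1) vis f).symm
    | cons e Q' ihQ =>
      obtain ⟨te, re, ce⟩ := e
      intro vis cur nxt t k f hn hk hex
      rw [extract] at hex
      by_cases hv : (vis.get? (re, ce)).isSome
      · rw [if_pos hv] at hex
        rw [goA_cons, if_pos hv]
        exact ihQ vis cur nxt t k f hn hk hex
      · rw [if_neg hv] at hex
        have hv' : (vis.get? (re, ce)).isSome = false := by simpa using hv
        cases cur with
        | cons p0 cur' =>
          simp only [tagL, List.map_cons, List.cons_append, List.cons.injEq,
            Prod.mk.injEq] at hex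
          obtain ⟨⟨rfl, rfl, rfl⟩, htail⟩ := hex
          exact freshStep walls D n IH Q' vis p0 cur' nxt te k f
            (by simp only [List.length_cons] at hn; omega) hk hv'
            (by simpa [tagL] using htail)
        | nil =>
          cases nxt with
          | nil => simp [tagL] at hex
          | cons q0 nxt'' =>
            simp only [tagL, List.map_nil, List.map_cons, List.nil_append,
              List.cons.injEq, Prod.mk.injEq] at hex
            obtain ⟨⟨rfl, rfl, rfl⟩, htail⟩ := hex
            obtain ⟨k', rfl⟩ : ∃ k', k = k' + 1 := ⟨k - 1, by omega⟩
            have hrot : outerCont walls D (k' + 1) (t + 1) []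
                  (insTags vis (tagL t [] ++ tagL (t + 1) (q0 :: nxt''))) (q0 :: nxt'') f
                = outerCont walls D k' (t + 1 + 1) (q0 :: nxt'')
                    (insTags vis (tagL (t + 1) (q0 :: nxt'') ++ tagL (t + 1 + 1) [])) [] f := by
              show outerB walls D (k' + 1) (q0 :: nxt'') (t + 1)
                  (insTags vis (tagL t [] ++ tagL (t + 1) (q0 :: nxt''))) f = _
              rw [outerB]
              simp only [List.isEmpty_cons, Bool.false_eq_true, if_false]
              have hd : insTags vis (tagL t [] ++ tagL (t + 1) (q0 :: nxt''))
                  = insTags vis (tagL (t + 1) (q0 :: nxt'') ++ tagL (t + 1 + 1) []) := by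
                simp [tagL]
              rw [hd]
              rfl
            rw [hrot]
            exact freshStep walls D n IH Q' vis q0 nxt'' [] (t + 1) k' f
              (by simp only [List.length_nil, List.length_cons] at hn ⊢; omega)
              (by simp only [List.length_nil, List.length_cons] at hk ⊢; omega)
              hv'
              (by simp only [tagL, List.map_nil, List.append_nil]
                  simpa [tagL] using htail)
-- ===== VERDICT (by name: the statement is the Claim_ definition above) =====
theorem day20_t_to_spec : Claim_equal_day20_t_to := by
  intro walls D er ec _
  unfold Spec_day20_t_to day20_t_to day20_t_to_alt
  have hex : extract PySem.Dict.empty [((0 : Int), er, ec)]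
      = tagL 0 [(er, ec)] ++ tagL (0 + 1) [] := by
    rw [extract]
    simp [extract, tagL, PySem.Dict.get?_empty]
  have h := bisimM walls D (2 ^ 60 + 1) [(0, er, ec)] PySem.Dict.empty
    [(er, ec)] [] 0 (2 ^ 60 + 1) (2 ^ 60) (by simp) (by simp) hex
  rw [h]
  have hstep : outerB walls D (2 ^ 60 + 2) [(er, ec)] 0
        ((PySem.Dict.empty : PySem.Dict (Int × Int) Int).insert (er, ec) 0) (2 ^ 60)
      = outerCont walls D (2 ^ 60 + 1) (0 + 1) [(er, ec)]
          (insTags PySem.Dict.empty (tagL 0 [(er, ec)] ++ tagL (0 + 1) [])) [] (2 ^ 60) := by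
    rw [show (2 ^ 60 + 2 : Nat) = (2 ^ 60 + 1) + 1 from rfl, outerB]
    simp only [List.isEmpty_cons, Bool.false_eq_true, if_false]
    rfl
  rw [hstep]
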